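-- pv_equiv track=rewrite | github.com/cliclye/predictobics | backend/metrics/district_locks.py | merge_locks_into_rankings
-- ===== SOURCE A (Python) =====
-- def merge_locks_into_rankings(
--     rankings: list[dict],
--     lock_info: list[dict],
-- ) -> list[dict]:
--     by_team = {x["team_key"]: x for x in lock_info}
--     merged = []
--     for row in rankings:
--         tk = row.get("team_key")
--         extra = by_team.get(tk, {})
--         merged.append({**row, **extra})
--     return merged
-- ===== SOURCE B (Python) =====
-- def merge_locks_into_rankings(
--     rankings: list[dict],
--     lock_info: list[dict],
-- ) -> list[dict]:
--     merged = []
--     for row in rankings: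
--         tk = row.get("team_key")
--         extra = {}
--         for x in reversed(lock_info):
--             if x["team_key"] == tk:
--                 extra = x
--                 break
--         merged.append({**row, **extra})
--     return merged
-- ===== Notes on version B (the rewrite author's own statement) =====
-- stated objective: alternative
-- what changed: Drops the precomputed team_key->entry dict index; instead each row scans lock_info in reverse and stops at the first (i.e. last-in-original-order) matching entry.
import Mathlib
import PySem

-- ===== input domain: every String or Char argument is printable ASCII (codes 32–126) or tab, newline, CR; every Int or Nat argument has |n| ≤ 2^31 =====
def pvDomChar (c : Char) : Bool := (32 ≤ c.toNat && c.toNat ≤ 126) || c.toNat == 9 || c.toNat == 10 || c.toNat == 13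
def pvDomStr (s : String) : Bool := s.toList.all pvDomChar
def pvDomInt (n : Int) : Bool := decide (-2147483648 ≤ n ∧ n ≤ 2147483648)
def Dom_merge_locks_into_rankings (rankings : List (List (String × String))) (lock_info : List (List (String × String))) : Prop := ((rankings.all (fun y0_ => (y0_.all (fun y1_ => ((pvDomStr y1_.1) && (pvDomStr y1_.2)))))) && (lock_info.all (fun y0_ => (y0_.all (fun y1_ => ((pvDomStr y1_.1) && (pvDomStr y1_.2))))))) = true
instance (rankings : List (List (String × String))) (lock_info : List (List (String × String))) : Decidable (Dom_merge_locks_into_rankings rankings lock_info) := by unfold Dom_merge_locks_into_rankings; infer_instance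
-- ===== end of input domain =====

-- B drops A's precomputed team_key index; each row instead scans lock_info in reverse
-- and stops at the first match (= last in original order). Alternative, not claimed faster.

-- the Python dict a `list[(k,v)]` association list denotes (first position, last value wins)
def pvDict (row : List (String × String)) : PySem.Dict String String :=
  PySem.Dict.update PySem.Dict.empty row

-- ===== PORT A =====
-- by_team = {x["team_key"]: x for x in lock_info}; then for each row: extra = by_team.get(tk, {}).
-- x["team_key"] is ported as the Option-valued lookup (none = the KeyError case, excluded by Pre_);
-- tk = row.get("team_key") is the same Option.
def merge_locks_into_rankings (rankings : List (List (String × String))) (lock_info : List (List (String × String))) : List (List (String × String)) :=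
  let by_team := lock_info.foldl
    (fun d x => d.insert ((pvDict x).get? "team_key") x) PySem.Dict.empty
  rankings.map (fun row =>
    let tk := (pvDict row).get? "team_key"
    let extra := by_team.getD tk []
    (((pvDict row).update extra).items))

-- ===== PORT B =====
-- inner loop: `for x in reversed(lock_info): if x["team_key"] == tk: extra = x; break`
def mlirFindLock (lock_info : List (List (String × String))) (tk : Option String) : List (String × String) :=
  match lock_info.reverse.find? (fun x => (pvDict x).get? "team_key" == tk) with
  | some x => x
  | none => []

-- outer loop over rankings, appending {**row, **extra}
def mlirGo (lock_info : List (List (String × String))) : List (List (String × String)) → List (List (String × String))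
  | [] => []
  | row :: rest =>
      ((pvDict row).update (mlirFindLock lock_info ((pvDict row).get? "team_key"))).items
        :: mlirGo lock_info rest

def merge_locks_into_rankings_alt (rankings : List (List (String × String))) (lock_info : List (List (String × String))) : List (List (String × String)) :=
  mlirGo lock_info rankings

-- ===== PRECONDITION & SPEC =====
-- Pre_ excludes exactly the inputs where Python A raises KeyError: a lock_info entry without "team_key".
def Pre_merge_locks_into_rankings (rankings : List (List (String × String))) (lock_info : List (List (String × String))) : Prop :=
  ∀ x ∈ lock_info, "team_key" ∈ x.map Prod.fst
instance (rankings : List (List (String × String))) (lock_info : List (List (String × String))) : Decidable (Pre_merge_locks_into_rankings rankings lock_info) := by unfold Pre_merge_locks_into_rankings; infer_instance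

def pvWitness_merge_locks_into_rankings : (List (List (String × String))) × (List (List (String × String))) :=
  ([[("team_key", "a"), ("rank", "1")]], [[("team_key", "a"), ("lock", "yes")]])

def Spec_merge_locks_into_rankings (rankings : List (List (String × String))) (lock_info : List (List (String × String))) (out : List (List (String × String))) : Prop := out = merge_locks_into_rankings_alt rankings lock_info
instance (rankings : List (List (String × String))) (lock_info : List (List (String × String))) (out : List (List (String × String))) : Decidable (Spec_merge_locks_into_rankings rankings lock_info out) := by unfold Spec_merge_locks_into_rankings; infer_instance

-- ===== CLAIM (what is proved, stated in full; the proofs are below) =====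
def Claim_equal_merge_locks_into_rankings : Prop := ∀ (rankings : List (List (String × String))) (lock_info : List (List (String × String))), Dom_merge_locks_into_rankings rankings lock_info → Pre_merge_locks_into_rankings rankings lock_info → Spec_merge_locks_into_rankings rankings lock_info (merge_locks_into_rankings rankings lock_info)

-- ===== LEMMAS AND PROOFS =====
-- the dict-index lookup equals the reverse-scan first match
theorem index_eq_revfind (l : List (List (String × String)))
    (d : PySem.Dict (Option String) (List (String × String))) (tk : Option String) :
    (l.foldl (fun d x => d.insert ((pvDict x).get? "team_key") x) d).getD tk [] =
    (match l.reverse.find? (fun x => (pvDict x).get? "team_key" == tk) with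
     | some x => x
     | none => d.getD tk []) := by
  induction l generalizing d with
  | nil => rfl
  | cons x l ih =>
    simp only [List.foldl_cons, List.reverse_cons]
    rw [ih, List.find?_append]
    cases h : l.reverse.find? (fun x => (pvDict x).get? "team_key" == tk) with
    | some y => simp
    | none =>
      simp only [Option.none_or, List.find?_cons, List.find?_nil]
      rw [PySem.Dict.getD_insert]
      by_cases hk : (pvDict x).get? "team_key" = tk
      · simp [hk]
      · have hb : ((pvDict x).get? "team_key" == tk) = false := by
          simp [hk]
        simp [hb, Ne.symm hk]

theorem row_lookup_eq (l : List (List (String × String))) (tk : Option String) :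
    (l.foldl (fun d x => d.insert ((pvDict x).get? "team_key") x) PySem.Dict.empty).getD tk [] =
    mlirFindLock l tk := by
  rw [index_eq_revfind]
  unfold mlirFindLock
  cases l.reverse.find? (fun x => (pvDict x).get? "team_key" == tk) with
  | some y => rfl
  | none => simp [PySem.Dict.getD_empty]

theorem map_eq_go (l : List (List (String × String))) (r : List (List (String × String))) :
    r.map (fun row => ((pvDict row).update (mlirFindLock l ((pvDict row).get? "team_key"))).items) =
    mlirGo l r := by
  induction r with
  | nil => rfl
  | cons row rest ih => simp only [List.map_cons, mlirGo, ih]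

-- ===== VERDICT (by name: the statement is the Claim_ definition above) =====
theorem merge_locks_into_rankings_spec : Claim_equal_merge_locks_into_rankings := by
  intro rankings lock_info _ _
  unfold Spec_merge_locks_into_rankings merge_locks_into_rankings merge_locks_into_rankings_alt
  simp only [row_lookup_eq]
  exact map_eq_go lock_info rankings
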